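-- pv_equiv track=rewrite | github.com/frankl8383/gbd2021_airpollution_resp_companion | scripts/00_validate_gbd_downloads.py | split_cli_values
-- ===== SOURCE A (Python) =====
-- def split_cli_values(values: list[str]) -> set[str]:
--     out: set[str] = set()
--     for value in values:
--         for item in value.split(","):
--             item = item.strip()
--             if item:
--                 out.add(item)
--     return out
-- ===== SOURCE B (Python) =====
-- def split_cli_values(values: list[str]) -> set[str]:
--     # Character-level state machine: no split(), no strip().
--     # tok: current token with leading whitespace already skipped and no
--     #      trailing whitespace; pend: run of whitespace seen since tok's
--     #      last non-space char (flushed into tok only if more text follows).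
--     out: set[str] = set()
--     for value in values:
--         tok = ""
--         pend = ""
--         for ch in value:
--             if ch == ',':
--                 if tok:
--                     out.add(tok)
--                 tok = ""
--                 pend = ""
--             elif ch.isspace():
--                 if tok:
--                     pend += ch
--             else:
--                 tok += pend + ch
--                 pend = ""
--         if tok:
--             out.add(tok)
--     return out
-- ===== Notes on version B (the rewrite author's own statement) =====
-- stated objective: alternative
-- what changed: B replaces A's split(',')-then-strip library pipeline with a single character-level state machine that builds each token in place (skipping leading whitespace, buffering a pending whitespace run, emitting on ',' or end of string), so no intermediate token lists or stripped copies are created.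
import Mathlib
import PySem

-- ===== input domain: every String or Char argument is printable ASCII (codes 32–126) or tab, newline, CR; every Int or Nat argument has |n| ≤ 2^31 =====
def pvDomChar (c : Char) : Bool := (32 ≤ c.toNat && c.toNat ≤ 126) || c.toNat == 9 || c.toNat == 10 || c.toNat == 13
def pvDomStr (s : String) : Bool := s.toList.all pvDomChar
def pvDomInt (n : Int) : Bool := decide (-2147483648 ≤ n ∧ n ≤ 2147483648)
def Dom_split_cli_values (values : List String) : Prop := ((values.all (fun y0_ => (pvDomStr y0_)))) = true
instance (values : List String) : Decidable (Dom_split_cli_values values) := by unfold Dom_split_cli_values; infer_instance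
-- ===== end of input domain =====

-- B replaces A's split/strip library calls by a single character-level state machine (alternative decomposition, same cost).
-- The Python functions return a set; per the type convention both ports return the distinct elements in insertion order (PySem.Set).

-- ===== PORT A =====
-- value.split(",") → PySem.Str.split?; sep "," ≠ "" so split? is never none and .getD [] is exact.
def split_cli_values (values : List String) : List String :=
  values.foldl (fun out value =>
    ((PySem.Str.split? value ",").getD []).foldl (fun out item =>
      let item := PySem.Str.strip item
      if item ≠ "" then PySem.Set.add out item else out) out) []

-- ===== PORT B =====
-- `if tok: out.add(tok)` — emit the current token if non-empty
def pvEmitB (out : List String) (tok : List Char) : List String :=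
  if tok ≠ [] then PySem.Set.add out (String.ofList tok) else out

-- the body of B's inner `for ch in value` loop, on state (out, tok, pend)
def pvStepB (st : List String × List Char × List Char) (c : Char) :
    List String × List Char × List Char :=
  match st with
  | (out, tok, pend) =>
    if c = ',' then (pvEmitB out tok, [], [])
    else if PySem.Chars.isspace c then (out, tok, if tok ≠ [] then pend ++ [c] else pend)
    else (out, tok ++ pend ++ [c], [])

def split_cli_values_alt (values : List String) : List String :=
  values.foldl (fun out value =>
    let st := value.toList.foldl pvStepB (out, [], [])
    pvEmitB st.1 st.2.1) []

-- ===== PRECONDITION & SPEC =====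
def Spec_split_cli_values (values : List String) (out : List String) : Prop := out = split_cli_values_alt values
instance (values : List String) (out : List String) : Decidable (Spec_split_cli_values values out) := by unfold Spec_split_cli_values; infer_instance

-- ===== CLAIM (what is proved, stated in full; the proofs are below) =====
def Claim_equal_split_cli_values : Prop := ∀ (values : List String), Dom_split_cli_values values → Spec_split_cli_values values (split_cli_values values)

-- ===== LEMMAS AND PROOFS =====

-- simple one-char split on ',' used to characterise PySem.Chars.splitOn s [',']
def spC : List Char → List (List Char)
  | [] => [[]]
  | c :: r => if c = ',' then [] :: spC r
              else match spC r with
                   | [] => [[c]]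
                   | t :: ts => (c :: t) :: ts

theorem spC_ne_nil (l : List Char) : spC l ≠ [] := by
  cases l with
  | nil => simp [spC]
  | cons c r =>
    simp only [spC]
    split_ifs
    · simp
    · cases h : spC r <;> simp

theorem spC_headI_tail (l : List Char) : (spC l).headI :: (spC l).tail = spC l := by
  cases h : spC l with
  | nil => exact absurd h (spC_ne_nil l)
  | cons t ts => rfl

theorem go_spec (l : List Char) (fuel : Nat) (h : l.length ≤ fuel) (cur : List Char)
    (acc : List (List Char)) :
    PySem.Chars.splitOn.go [','] fuel l cur acc =
      acc.reverse ++ (cur.reverse ++ (spC l).headI) :: (spC l).tail := by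
  induction l generalizing fuel cur acc with
  | nil =>
    cases fuel <;> simp [PySem.Chars.splitOn.go, spC]
  | cons c r ih =>
    cases fuel with
    | zero => simp at h
    | succ f =>
      simp only [List.length_cons, Nat.succ_le_succ_iff] at h
      rw [PySem.Chars.splitOn.go]
      simp only [List.isPrefixOf, Bool.and_true, List.length_singleton, List.drop_succ_cons,
        List.drop_zero]
      by_cases hc : c = ','
      · rw [if_pos (by simp [hc]), ih f h [] (cur.reverse :: acc)]
        subst hc
        simp [spC, spC_headI_tail]
      · rw [if_neg (show ¬((',' == c) = true) by simp only [beq_iff_eq]; exact fun hh => hc hh.symm),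
          ih f h (c :: cur) acc]
        have hne := spC_ne_nil r
        simp only [spC, if_neg hc]
        cases h2 : spC r with
        | nil => exact absurd h2 hne
        | cons t ts => simp

theorem splitOn_eq_spC (s : List Char) : PySem.Chars.splitOn s [','] = spC s := by
  rw [PySem.Chars.splitOn, go_spec s (s.length + 1) (by omega) [] []]
  cases h : spC s with
  | nil => exact absurd h (spC_ne_nil s)
  | cons t ts => simp

-- the common inner step of A (strip, filter empty, add)
def stepF (out : List String) (item : String) : List String :=
  let item := PySem.Str.strip item
  if item ≠ "" then PySem.Set.add out item else out

theorem tokens_eq (v : String) :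
    (PySem.Str.split? v ",").getD [] = (spC v.toList).map String.ofList := by
  simp [PySem.Str.split?, PySem.Chars.split?, splitOn_eq_spC]

-- pure token evolution of B's state machine (ignores ',': only used on comma-free segments and in lockstep with pvStepB)
def tokScan : List Char → List Char → List Char → List Char
  | tok, _, [] => tok
  | tok, pend, c :: s =>
      if PySem.Chars.isspace c then tokScan tok (if tok ≠ [] then pend ++ [c] else pend) s
      else tokScan (tok ++ pend ++ [c]) [] s

theorem rstrip_append_cons (xs : List Char) (c : Char) (s : List Char)
    (hc : PySem.Chars.isspace c = false) :
    PySem.Chars.rstrip (xs ++ c :: s) = xs ++ c :: PySem.Chars.rstrip s := by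
  unfold PySem.Chars.rstrip
  rw [show (xs ++ c :: s).reverse = s.reverse ++ c :: xs.reverse by simp,
    List.dropWhile_append]
  by_cases h : (s.reverse.dropWhile PySem.Chars.isspace).isEmpty
  · rw [if_pos h, List.dropWhile_cons_of_neg (by simp [hc])]
    simp only [List.isEmpty_iff] at h
    simp [h]
  · rw [if_neg h]
    simp

theorem tokScan_ne_nil (s tok pend : List Char) (htok : tok ≠ [])
    (hpend : pend.all PySem.Chars.isspace) :
    tokScan tok pend s = tok ++ PySem.Chars.rstrip (pend ++ s) := by
  induction s generalizing tok pend with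
  | nil =>
    have h0 : PySem.Chars.rstrip pend = [] := by
      unfold PySem.Chars.rstrip
      rw [List.dropWhile_eq_nil_iff.mpr (by intro x hx; simp at hx hpend; exact hpend x hx)]
      simp
    simp [tokScan, h0]
  | cons c s ih =>
    by_cases hc : PySem.Chars.isspace c
    · rw [tokScan, if_pos hc, if_pos htok, ih _ _ htok (by simp at hpend ⊢; exact ⟨hpend, hc⟩)]
      simp
    · rw [tokScan, if_neg hc,
        ih (tok ++ pend ++ [c]) [] (by simp) (by simp),
        show pend ++ c :: s = pend ++ [c] ++ s by simp,
        show pend ++ [c] ++ s = pend ++ (c :: s) by simp,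
        rstrip_append_cons pend c s (by simpa using hc)]
      simp

theorem tokScan_nil (s : List Char) : tokScan [] [] s = PySem.Chars.strip s := by
  induction s with
  | nil => simp [tokScan, PySem.Chars.strip, PySem.Chars.lstrip, PySem.Chars.rstrip]
  | cons c s ih =>
    by_cases hc : PySem.Chars.isspace c
    · rw [tokScan, if_pos hc]
      simp only [ne_eq, not_true_eq_false, if_false]
      rw [ih]
      unfold PySem.Chars.strip PySem.Chars.lstrip
      rw [List.dropWhile_cons_of_pos hc]
    · rw [tokScan, if_neg hc]
      simp only [List.nil_append]
      rw [tokScan_ne_nil s [c] [] (by simp) (by simp)]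
      unfold PySem.Chars.strip PySem.Chars.lstrip
      rw [List.dropWhile_cons_of_neg (by simp [hc])]
      simpa using (rstrip_append_cons [] c s (by simpa using hc)).symm

-- A's step on a raw segment equals B's emit of the scanned token
theorem stepF_eq_emit (o : List String) (seg : List Char) :
    stepF o (String.ofList seg) = pvEmitB o (tokScan [] [] seg) := by
  rw [tokScan_nil]
  unfold stepF pvEmitB
  simp [PySem.Str.strip]

-- B's whole inner loop, from any state, equals A's fold over the remaining comma segments
theorem scan_eq (l : List Char) (out : List String) (tok pend : List Char) :
    (let st := l.foldl pvStepB (out, tok, pend); pvEmitB st.1 st.2.1)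
      = ((spC l).tail.map String.ofList).foldl stepF
          (pvEmitB out (tokScan tok pend (spC l).headI)) := by
  induction l generalizing out tok pend with
  | nil => simp [spC, tokScan]
  | cons c l ih =>
    by_cases hc : c = ','
    · subst hc
      rw [List.foldl_cons, show pvStepB (out, tok, pend) ',' = (pvEmitB out tok, [], []) from rfl,
        ih]
      have hspc : spC (',' :: l) = [] :: spC l := by simp [spC]
      have hne := spC_ne_nil l
      cases h2 : spC l with
      | nil => exact absurd h2 hne
      | cons h t =>
        rw [hspc, h2]
        simp only [List.tail_cons, List.headI_cons, List.map_cons, List.foldl_cons, tokScan]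
        rw [stepF_eq_emit]
    · have hstep : pvStepB (out, tok, pend) c =
          (if PySem.Chars.isspace c then (out, tok, if tok ≠ [] then pend ++ [c] else pend)
           else (out, tok ++ pend ++ [c], [])) := by
        simp [pvStepB, hc]
      have hne := spC_ne_nil l
      cases h2 : spC l with
      | nil => exact absurd h2 hne
      | cons h t =>
        have hspc : spC (c :: l) = (c :: h) :: t := by simp only [spC, if_neg hc, h2]
        by_cases hw : PySem.Chars.isspace c
        · rw [List.foldl_cons, hstep, if_pos hw, ih, hspc, h2]
          simp only [List.tail_cons, List.headI_cons, tokScan, if_pos hw]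
        · rw [List.foldl_cons, hstep, if_neg hw, ih, hspc, h2]
          simp only [List.tail_cons, List.headI_cons, tokScan, if_neg hw]

-- per-value agreement: B's char scan = A's per-value token fold
theorem inner_eq (out : List String) (v : String) :
    (let st := v.toList.foldl pvStepB (out, [], []); pvEmitB st.1 st.2.1)
      = ((PySem.Str.split? v ",").getD []).foldl stepF out := by
  rw [scan_eq, tokens_eq]
  have hne := spC_ne_nil v.toList
  cases h2 : spC v.toList with
  | nil => exact absurd h2 hne
  | cons h t =>
    simp only [List.headI_cons, List.tail_cons, List.map_cons, List.foldl_cons]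
    rw [stepF_eq_emit]

-- ===== VERDICT (by name: the statement is the Claim_ definition above) =====
theorem split_cli_values_spec : Claim_equal_split_cli_values := by
  intro values hd
  show split_cli_values values = split_cli_values_alt values
  unfold split_cli_values split_cli_values_alt
  induction values using List.reverseRecOn with
  | nil => rfl
  | append_singleton vs v ih =>
    rw [List.foldl_append, List.foldl_append, List.foldl_cons, List.foldl_nil,
      List.foldl_cons, List.foldl_nil,
      ih (by unfold Dom_split_cli_values at hd ⊢; simp only [List.all_append] at hd; exact (Bool.and_eq_true_iff.mp hd).1),
      inner_eq]
    rfl
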